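-- pv_equiv track=rewrite | github.com/dirkmo/prim | src/tomlfix.py | workaround
-- ===== SOURCE A (Python) =====
-- def workaround(l):
--     # toml lib has a bug
--     # when loading a file with a list containing an string element "," it is replaced by two empty string elements
--     nl = []
--     i = 0
--     while i < len(l):
--         if (i < len(l)-1) and (l[i] == "") and (l[i+1] == ""):
--             nl.append(",")
--             i += 1
--         else:
--             nl.append(l[i])
--         i += 1
--     return nl
-- ===== SOURCE B (Python) =====
-- def workaround(l):
--     # Run-length approach: count consecutive empty strings; each pair becomes "," ,
--     # an odd leftover stays a single "".
--     nl = []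
--     empties = 0
--     for x in l:
--         if x == "":
--             empties += 1
--         else:
--             nl.extend([","] * (empties // 2))
--             nl.extend([""] * (empties % 2))
--             empties = 0
--             nl.append(x)
--     nl.extend([","] * (empties // 2))
--     nl.extend([""] * (empties % 2))
--     return nl
-- ===== Notes on version B (the rewrite author's own statement) =====
-- stated objective: alternative
-- what changed: Replaces the index-based pairwise look-ahead (i, i+1, i += 2) with a single fold that run-length counts consecutive empty strings and flushes count//2 commas plus count%2 empties at each non-empty element and at the end.
import Mathlib
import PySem

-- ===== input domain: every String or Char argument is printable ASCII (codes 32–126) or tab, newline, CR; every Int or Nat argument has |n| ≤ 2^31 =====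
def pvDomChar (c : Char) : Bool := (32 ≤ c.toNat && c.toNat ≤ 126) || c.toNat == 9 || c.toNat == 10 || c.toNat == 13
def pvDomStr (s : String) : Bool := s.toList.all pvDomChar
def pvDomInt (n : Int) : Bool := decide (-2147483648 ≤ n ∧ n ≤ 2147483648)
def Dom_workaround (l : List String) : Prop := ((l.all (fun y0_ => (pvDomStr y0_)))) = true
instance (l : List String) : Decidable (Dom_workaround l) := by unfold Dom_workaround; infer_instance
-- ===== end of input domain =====

-- B replaces A's pairwise index look-ahead with a run-length count of consecutive
-- empty strings flushed as count/2 commas plus count%2 empties (alternative decomposition).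


-- ===== PORT A =====
-- A's while loop over index i: either consumes two consecutive "" emitting ",",
-- or consumes one element emitting it; transcribed as structural recursion.
def workaround (l : List String) : List String :=
  match l with
  | [] => []
  | [x] => [x]
  | x :: y :: rest =>
    if x = "" ∧ y = "" then "," :: workaround rest
    else x :: workaround (y :: rest)

-- ===== PORT B =====
-- flush of a pending run of `c` empty strings: c/2 commas then c%2 empties
def flushB (c : Nat) : List String :=
  List.replicate (c / 2) "," ++ List.replicate (c % 2) ""

def stepB (s : Nat × List String) (x : String) : Nat × List String :=
  if x = "" then (s.1 + 1, s.2) else (0, s.2 ++ flushB s.1 ++ [x])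

def workaround_alt (l : List String) : List String :=
  let s := l.foldl stepB (0, [])
  s.2 ++ flushB s.1

-- ===== PRECONDITION & SPEC =====
def Spec_workaround (l : List String) (out : List String) : Prop := out = workaround_alt l
instance (l : List String) (out : List String) : Decidable (Spec_workaround l out) := by unfold Spec_workaround; infer_instance

-- ===== CLAIM (what is proved, stated in full; the proofs are below) =====
def Claim_equal_workaround : Prop := ∀ (l : List String), Dom_workaround l → Spec_workaround l (workaround l)

-- ===== LEMMAS AND PROOFS =====
def finishB (s : Nat × List String) : List String := s.2 ++ flushB s.1

theorem finishB_acc (t : List String) (c : Nat) (acc : List String) :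
    finishB (t.foldl stepB (c, acc)) = acc ++ finishB (t.foldl stepB (c, [])) := by
  induction t generalizing c acc with
  | nil => simp [finishB]
  | cons z t ih =>
    by_cases hz : z = "" <;>
      simp only [List.foldl_cons, stepB, hz, if_pos, ite_false]
    · rw [ih (c+1) acc]
    · rw [ih 0 (acc ++ flushB c ++ [z]), ih 0 ([] ++ flushB c ++ [z])]
      simp

theorem flushB_add_two (c : Nat) : flushB (c + 2) = "," :: flushB c := by
  simp [flushB, Nat.add_div_right, Nat.add_mod_right, List.replicate_succ]

theorem finishB_add_two (t : List String) (c : Nat) (acc : List String) :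
    finishB (t.foldl stepB (c + 2, acc)) = acc ++ "," :: finishB (t.foldl stepB (c, [])) := by
  induction t generalizing c acc with
  | nil => simp [finishB, flushB_add_two]
  | cons z t ih =>
    by_cases hz : z = "" <;>
      simp only [List.foldl_cons, stepB, hz, if_pos, ite_false]
    · have := ih (c + 1) acc
      simpa using this
    · rw [finishB_acc t 0 (acc ++ flushB (c+2) ++ [z]), finishB_acc t 0 ([] ++ flushB c ++ [z])]
      simp [flushB_add_two]

theorem alt_cons_ne {y : String} (t : List String) (hy : y ≠ "") :
    workaround_alt (y :: t) = y :: workaround_alt t := by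
  have h1 := finishB_acc t 0 ([] ++ flushB 0 ++ [y])
  simp only [workaround_alt, List.foldl_cons, stepB, if_neg hy]
  simpa [finishB, flushB] using h1

theorem alt_eq (l : List String) : workaround l = workaround_alt l := by
  induction l using workaround.induct with
  | case1 => rfl
  | case2 x =>
    by_cases hx : x = "" <;>
      simp [workaround, workaround_alt, stepB, hx, flushB]
  | case3 x y rest h ih =>
    obtain ⟨hx, hy⟩ := h
    subst hx; subst hy
    rw [workaround, if_pos ⟨rfl, rfl⟩, ih]
    have h1 := finishB_add_two rest 0 []
    simp only [workaround_alt, List.foldl_cons, stepB, ite_true]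
    simpa [finishB, flushB] using h1.symm
  | case4 x y rest h ih =>
    rw [workaround, if_neg h, ih]
    by_cases hx : x = ""
    · subst hx
      have hy : y ≠ "" := by intro hy; exact h ⟨rfl, hy⟩
      rw [alt_cons_ne rest hy]
      have h1 := finishB_acc rest 0 ([] ++ flushB 1 ++ [y])
      simp only [workaround_alt, List.foldl_cons, stepB, ite_true, if_neg hy]
      simpa [finishB, flushB] using h1.symm
    · rw [alt_cons_ne (y :: rest) hx]

theorem workaround_spec : Claim_equal_workaround := by
  intro l _
  unfold Spec_workaround
  exact alt_eq l
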